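-- pv_equiv track=rewrite | github.com/XdibsAI/DIBS-UMKM | frontend/fix_toko_final.py | find_build_method_range
-- ===== SOURCE A (Python) =====
-- def find_build_method_range(lines):
--     """Cari baris awal dan akhir dari method build()"""
--     start = None
--     brace_count = 0
--     in_method = False
--
--     for i, line in enumerate(lines):
--         if start is None:
--             # Cari @override diikuti Widget build
--             if '@override' in line:
--                 # Cek apakah baris berikutnya adalah Widget build
--                 for j in range(i, min(i+3, len(lines))):
--                     if 'Widget build(BuildContext context)' in lines[j]:
--                         start = i
--                         break
--
--         if start is not None and i >= start:
--             brace_count += line.count('{') - line.count('}')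
--             if i > start and brace_count == 0:
--                 return start, i
--
--     return start, None
-- ===== SOURCE B (Python) =====
-- def find_build_method_range(lines):
--     """Cari baris awal dan akhir dari method build()"""
--     n = len(lines)
--     # per-line feature tables, computed once
--     ov = ['@override' in l for l in lines]
--     bd = ['Widget build(BuildContext context)' in l for l in lines]
--     # window table: does the 3-line window at i contain the build signature?
--     win = [bd[i] or (i + 1 < n and bd[i + 1]) or (i + 2 < n and bd[i + 2])
--            for i in range(n)]
--     # prefix sums of brace deltas: pre[k] = net braces of lines[:k]
--     pre = [0] * (n + 1)
--     for i in range(n):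
--         pre[i + 1] = pre[i] + lines[i].count('{') - lines[i].count('}')
--     start = next((i for i in range(n) if ov[i] and win[i]), None)
--     if start is None:
--         return None, None
--     end = next((i for i in range(start + 1, n) if pre[i + 1] - pre[start] == 0), None)
--     return start, end
-- ===== Notes on version B (the rewrite author's own statement) =====
-- stated objective: alternative
-- what changed: A fuses start-search and brace-counting into one stateful scan with an inner index-window loop and a running balance; B is a table formulation: it precomputes per-line marker lists for '@override' and the build signature, a shifted-window OR table for the start condition, and a prefix-sum array of brace deltas, then reads both answers off the tables with first-match searches.
import Mathlib
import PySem

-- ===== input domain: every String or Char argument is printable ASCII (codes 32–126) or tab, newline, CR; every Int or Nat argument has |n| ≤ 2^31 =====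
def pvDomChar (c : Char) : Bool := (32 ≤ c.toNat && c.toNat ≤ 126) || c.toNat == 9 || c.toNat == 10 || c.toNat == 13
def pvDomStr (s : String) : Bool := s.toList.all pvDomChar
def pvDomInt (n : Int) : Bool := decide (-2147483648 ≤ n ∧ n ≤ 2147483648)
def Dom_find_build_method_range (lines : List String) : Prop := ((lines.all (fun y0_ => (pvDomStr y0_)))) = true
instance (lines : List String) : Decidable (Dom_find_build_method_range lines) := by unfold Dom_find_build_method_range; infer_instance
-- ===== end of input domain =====

-- B replaces A's fused stateful scan by a table formulation (per-line marker lists, a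
-- shifted-window OR for the start, a prefix-sum array for the end); objective: alternative.

-- ===== PORT A =====
-- inner loop: 'for j in range(i, min(i+3, len(lines))): if target in lines[j]: … break'
def aInner (lines : List String) : List Int → Bool
  | [] => false
  | j :: js =>
    if PySem.Str.isIn "Widget build(BuildContext context)" ((PySem.List.pyGet? lines j).getD "") then true
    else aInner lines js

-- the main 'for i, line in enumerate(lines)' loop; i is the current index, rest the remaining lines
def aLoop (lines : List String) (i : Nat) (rest : List String) (start : Option Int) (brace : Int) :
    Option Int × Option Int :=
  match rest with
  | [] => (start, none)
  | line :: rest' =>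
    let start1 :=
      if start = none then
        if PySem.Str.isIn "@override" line then
          if aInner lines (PySem.List.pyRange (i : Int) (min (i + 3) lines.length : Nat) 1) then some (i : Int)
          else start
        else start
      else start
    match start1 with
    | none => aLoop lines (i + 1) rest' none brace
    | some s =>
      if (i : Int) ≥ s then
        let brace1 := brace + (PySem.Str.count line "{" : Int) - (PySem.Str.count line "}" : Int)
        if (i : Int) > s ∧ brace1 = 0 then (some s, some (i : Int))
        else aLoop lines (i + 1) rest' (some s) brace1
      else aLoop lines (i + 1) rest' (some s) brace

def find_build_method_range (lines : List String) : Option Int × Option Int :=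
  aLoop lines 0 lines none 0

-- ===== PORT B =====
-- 'pre[i+1] = pre[i] + lines[i].count('{') - lines[i].count('}')' filling loop (tail of the array)
def bPreAux (a : Int) : List String → List Int
  | [] => []
  | l :: ls =>
    let a' := a + (PySem.Str.count l "{" : Int) - (PySem.Str.count l "}" : Int)
    a' :: bPreAux a' ls

-- the prefix-sum array pre (pre[k] = net braces of lines[:k])
def bPre (lines : List String) : List Int := 0 :: bPreAux 0 lines

def find_build_method_range_alt (lines : List String) : Option Int × Option Int :=
  let n := lines.length
  let ov := lines.map (fun l => PySem.Str.isIn "@override" l)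
  let bd := lines.map (fun l => PySem.Str.isIn "Widget build(BuildContext context)" l)
  let win := (List.range n).map (fun i =>
      bd.getD i false || (decide (i + 1 < n) && bd.getD (i + 1) false)
        || (decide (i + 2 < n) && bd.getD (i + 2) false))
  let pre := bPre lines
  -- start = next((i for i in range(n) if ov[i] and win[i]), None)
  match (List.range n).find? (fun i => ov.getD i false && win.getD i false) with
  | none => (none, none)
  | some s =>
    -- end = next((i for i in range(start+1, n) if pre[i+1] - pre[start] == 0), None)
    (some (s : Int),
     ((List.range' (s + 1) (n - (s + 1))).find?
        (fun i => pre.getD (i + 1) 0 - pre.getD s 0 == 0)).map (fun i => (i : Int)))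

-- ===== PRECONDITION & SPEC =====
def Spec_find_build_method_range (lines : List String) (out : Option Int × Option Int) : Prop := out = find_build_method_range_alt lines
instance (lines : List String) (out : Option Int × Option Int) : Decidable (Spec_find_build_method_range lines out) := by unfold Spec_find_build_method_range; infer_instance

-- ===== CLAIM (what is proved, stated in full; the proofs are below) =====
def Claim_equal_find_build_method_range : Prop := ∀ (lines : List String), Dom_find_build_method_range lines → Spec_find_build_method_range lines (find_build_method_range lines)

-- ===== LEMMAS AND PROOFS =====

-- proof-only intermediate forms (a two-pass reading of A used as a stepping stone)
def bHit (l : String) : Bool := PySem.Str.isIn "Widget build(BuildContext context)" l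

def midFindStart (lines : List String) (i : Nat) : List String → Option Nat
  | [] => none
  | line :: rest' =>
    if PySem.Str.isIn "@override" line && ((lines.drop i).take 3).any bHit then some i
    else midFindStart lines (i + 1) rest'

def midEnd (start : Nat) (off : Nat) (rest : List String) (bal : Int) : Option Int :=
  match rest with
  | [] => none
  | l :: rest' =>
    let bal1 := bal + (PySem.Str.count l "{" : Int) - (PySem.Str.count l "}" : Int)
    if 0 < off ∧ bal1 = 0 then some ((start : Int) + off)
    else midEnd start (off + 1) rest' bal1

-- A's index-window scan equals any over the 3-line window
lemma aInner_eq_any (lines : List String) (i k : Nat) (h : i ≤ lines.length) :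
    aInner lines (PySem.List.pyRange (i : Int) (min (i + k) lines.length : Nat) 1)
      = ((lines.drop i).take k).any bHit := by
  induction k generalizing i with
  | zero =>
    simp [Nat.min_eq_left h, PySem.List.pyRange_one_eq_nil (le_refl (i : Int)), aInner]
  | succ k ih =>
    by_cases hi : i < lines.length
    · have hlt : (i : Int) < ((min (i + (k + 1)) lines.length : Nat) : Int) := by
        have : i < min (i + (k + 1)) lines.length := by omega
        exact_mod_cast this
      rw [PySem.List.pyRange_one_cons hlt]
      have hmin : (min (i + (k + 1)) lines.length) = (min ((i + 1) + k) lines.length) := by omega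
      have hcast : ((i : Int) + 1) = ((i + 1 : Nat) : Int) := by push_cast; ring
      rw [aInner, hcast, hmin, ih (i + 1) hi]
      rw [List.drop_eq_getElem_cons hi, List.take_succ_cons, List.any_cons]
      simp only [PySem.List.pyGet?_natCast, List.getElem?_eq_getElem hi, Option.getD_some]
      cases hb : PySem.Str.isIn "Widget build(BuildContext context)" lines[i] with
      | false => simp only [bHit, hb, Bool.false_eq_true, if_false, Bool.false_or]
      | true => simp only [bHit, hb, if_true, Bool.true_or]
    · have hi' : i = lines.length := by omega
      have : (min (i + (k + 1)) lines.length) = i := by omega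
      rw [this]
      simp [PySem.List.pyRange_one_eq_nil (le_refl (i : Int)), aInner,
        List.drop_eq_nil_of_le (le_of_eq hi'.symm)]

-- once start = s is fixed, A's fused loop is the brace pass midEnd
lemma phase2 (lines : List String) (s : Nat) :
    ∀ (rest : List String) (i : Nat) (bal : Int), s ≤ i →
      aLoop lines i rest (some (s : Int)) bal = (some (s : Int), midEnd s (i - s) rest bal) := by
  intro rest
  induction rest with
  | nil => intro i bal _; simp [aLoop, midEnd]
  | cons line rest' ih =>
    intro i bal hsi
    have hge : ((i : Int) ≥ (s : Int)) := by exact_mod_cast hsi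
    simp only [aLoop, midEnd, reduceCtorEq, reduceIte, if_pos hge]
    have hoff : ((i : Int) > (s : Int) ↔ 0 < i - s) := by omega
    have hidx : ((s : Int) + (↑(i - s) : Int)) = (i : Int) := by omega
    by_cases hc : (i : Int) > (s : Int) ∧ bal + (PySem.Str.count line "{" : Int) - (PySem.Str.count line "}" : Int) = 0
    · rw [if_pos hc, if_pos ⟨hoff.mp hc.1, hc.2⟩, hidx]
    · rw [if_neg hc, if_neg (by rw [hoff] at hc; exact hc), ih (i+1) _ (by omega)]
      have h1 : i + 1 - s = i - s + 1 := by omega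
      rw [h1]

lemma phase1 (lines : List String) :
    ∀ (rest : List String) (i : Nat), rest = lines.drop i →
      aLoop lines i rest none 0 =
        match midFindStart lines i rest with
        | none => (none, none)
        | some s => (some (s : Int), midEnd s 0 (lines.drop s) 0) := by
  intro rest
  induction rest with
  | nil => intro i _; simp [aLoop, midFindStart]
  | cons line rest' ih =>
    intro i hdrop
    have hi : i < lines.length := by
      by_contra hle
      simp [List.drop_eq_nil_of_le (by omega : lines.length ≤ i)] at hdrop
    have hrest' : rest' = lines.drop (i + 1) := by
      have := List.drop_eq_getElem_cons hi (l := lines)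
      rw [← hdrop] at this
      exact (List.cons.injEq _ _ _ _).mp this |>.2
    have hwin := aInner_eq_any lines i 3 (le_of_lt hi)
    rw [aLoop, midFindStart]
    simp only [reduceIte, hwin]
    by_cases hov : PySem.Str.isIn "@override" line = true
    · by_cases hany : ((lines.drop i).take 3).any bHit = true
      · simp only [hov, hany, if_pos, Bool.and_self]
        have hnot : ¬ ((i : Int) > (i : Int) ∧ (0 : Int) + (PySem.Str.count line "{" : Int) - (PySem.Str.count line "}" : Int) = 0) := by
          intro hc; exact lt_irrefl _ hc.1
        rw [if_pos (le_refl ((i : Int))), if_neg hnot, phase2 lines i rest' (i + 1) _ (by omega)]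
        have h1 : i + 1 - i = 1 := by omega
        rw [h1, ← hdrop, midEnd]
        simp
      · simp only [hov, if_true, hany, if_false, Bool.false_eq_true, Bool.and_false]
        rw [ih (i + 1) hrest']
    · simp only [hov, if_false, Bool.false_and, Bool.false_eq_true]
      rw [ih (i + 1) hrest']

-- getD of a map past its end is the default
lemma getD_map_out {α : Type} (f : α → Bool) (l : List α) (j : Nat) (h : l.length ≤ j) :
    (l.map f).getD j false = false := by
  simp [List.getD, List.getElem?_eq_none (by simpa using h)]

lemma getD_map_in {α : Type} [Inhabited α] (f : α → Bool) (l : List α) (j : Nat) (h : j < l.length) :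
    (l.map f).getD j false = f l[j] := by
  simp [List.getD, h]

-- the 3-line window any rewritten through the bd table
lemma window_eq (lines : List String) (i : Nat) (hi : i < lines.length) :
    ((lines.drop i).take 3).any bHit
      = ((lines.map bHit).getD i false || (lines.map bHit).getD (i + 1) false
          || (lines.map bHit).getD (i + 2) false) := by
  rw [List.drop_eq_getElem_cons hi, List.take_succ_cons, List.any_cons,
    getD_map_in bHit lines i hi]
  by_cases h1 : i + 1 < lines.length
  · rw [List.drop_eq_getElem_cons (i := i + 1) h1, List.take_succ_cons, List.any_cons,
      getD_map_in bHit lines (i + 1) h1]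
    by_cases h2 : i + 2 < lines.length
    · rw [List.drop_eq_getElem_cons (i := i + 2) h2, List.take_succ_cons, List.any_cons,
        getD_map_in bHit lines (i + 2) h2]
      simp [Bool.or_assoc]
    · rw [List.drop_eq_nil_of_le (by omega : lines.length ≤ i + 2),
        getD_map_out bHit lines (i + 2) (by omega)]
      simp
  · rw [List.drop_eq_nil_of_le (by omega : lines.length ≤ i + 1),
      getD_map_out bHit lines (i + 1) (by omega),
      getD_map_out bHit lines (i + 2) (by omega)]
    simp

-- the guarded window predicate used by B, at index i < n
lemma win_getD (lines : List String) (i : Nat) (hi : i < lines.length) :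
    ((List.range lines.length).map (fun i =>
        (lines.map bHit).getD i false
          || (decide (i + 1 < lines.length) && (lines.map bHit).getD (i + 1) false)
          || (decide (i + 2 < lines.length) && (lines.map bHit).getD (i + 2) false))).getD i false
      = ((lines.drop i).take 3).any bHit := by
  have hlen : i < (List.range lines.length).length := by simpa using hi
  rw [getD_map_in _ (List.range lines.length) i hlen]
  rw [window_eq lines i hi]
  simp only [List.getElem_range]
  by_cases h1 : i + 1 < lines.length
  · by_cases h2 : i + 2 < lines.length
    · simp [h1, h2]
    · have e2 : lines[i + 2]? = none := by simp; omega
      simp [h1, e2]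
  · have e1 : lines[i + 1]? = none := by simp; omega
    have e2 : lines[i + 2]? = none := by simp; omega
    simp [h1, e2]

-- pass 1 equals B's find? over range
lemma start_eq (lines : List String) :
    ∀ (rest : List String) (i : Nat), rest = lines.drop i →
      midFindStart lines i rest
        = (List.range' i (lines.length - i)).find? (fun j =>
            (lines.map (fun l => PySem.Str.isIn "@override" l)).getD j false &&
            ((List.range lines.length).map (fun j =>
              (lines.map bHit).getD j false
                || (decide (j + 1 < lines.length) && (lines.map bHit).getD (j + 1) false)
                || (decide (j + 2 < lines.length) && (lines.map bHit).getD (j + 2) false))).getD j false) := by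
  intro rest
  induction rest with
  | nil =>
    intro i hdrop
    have hlen := congrArg List.length hdrop
    simp only [List.length_nil, List.length_drop] at hlen
    rw [(by omega : lines.length - i = 0)]
    simp [midFindStart]
  | cons line rest' ih =>
    intro i hdrop
    have hi : i < lines.length := by
      by_contra hle
      simp [List.drop_eq_nil_of_le (by omega : lines.length ≤ i)] at hdrop
    have hline : line = lines[i] := by
      have := List.drop_eq_getElem_cons hi (l := lines)
      rw [← hdrop] at this
      exact (List.cons.injEq _ _ _ _).mp this |>.1
    have hrest' : rest' = lines.drop (i + 1) := by
      have := List.drop_eq_getElem_cons hi (l := lines)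
      rw [← hdrop] at this
      exact (List.cons.injEq _ _ _ _).mp this |>.2
    rw [(by omega : lines.length - i = (lines.length - (i + 1)) + 1), List.range'_succ,
      List.find?_cons, midFindStart]
    rw [win_getD lines i hi, getD_map_in _ lines i hi, ← hline]
    cases hc : (PySem.Str.isIn "@override" line && ((lines.drop i).take 3).any bHit) with
    | true => simp
    | false =>
      simp only [Bool.false_eq_true, if_false]
      simpa using ih (i + 1) hrest'

-- prefix sums: (bPre lines).getD k 0 is the net brace count of lines.take k
def sDelta (l : String) : Int := (PySem.Str.count l "{" : Int) - (PySem.Str.count l "}" : Int)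

lemma bPreAux_getD (a : Int) :
    ∀ (ls : List String) (k : Nat), k < ls.length →
      (bPreAux a ls).getD k 0 = a + (((ls.take (k + 1)).map sDelta).sum) := by
  intro ls
  induction ls generalizing a with
  | nil => intro k hk; simp at hk
  | cons l t ih =>
    intro k hk
    cases k with
    | zero => simp [bPreAux, sDelta]; ring
    | succ k =>
      have hk' : k < t.length := by simpa using hk
      simp only [bPreAux, List.take_succ_cons, List.map_cons, List.sum_cons]
      have : (bPreAux (a + (PySem.Str.count l "{" : Int) - (PySem.Str.count l "}" : Int)) t).getD k 0
          = (a + (PySem.Str.count l "{" : Int) - (PySem.Str.count l "}" : Int)) + ((t.take (k + 1)).map sDelta).sum :=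
        ih _ k hk'
      simp only [List.getD, List.getElem?_cons_succ] at *
      rw [this, sDelta]; ring

lemma bPre_getD (lines : List String) (k : Nat) (hk : k ≤ lines.length) :
    (bPre lines).getD k 0 = ((lines.take k).map sDelta).sum := by
  cases k with
  | zero => simp [bPre]
  | succ k =>
    have hk' : k < lines.length := by omega
    have := bPreAux_getD 0 lines k hk'
    simp only [bPre, List.getD, List.getElem?_cons_succ]
    simp only [List.getD] at this
    rw [this]; ring

-- net brace count of a prefix, as S
def S (lines : List String) (k : Nat) : Int := ((lines.take k).map sDelta).sum

lemma S_succ (lines : List String) (k : Nat) (hk : k < lines.length) :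
    S lines (k + 1) = S lines k + sDelta lines[k] := by
  have hk' : k < (lines.map sDelta).length := by simpa using hk
  simp only [S, List.map_take]
  rw [List.sum_take_succ _ k hk']
  simp

-- the prefix-sum recurrence
lemma pre_succ (lines : List String) (k : Nat) (hk : k < lines.length) :
    (bPre lines).getD (k + 1) 0 = (bPre lines).getD k 0 + sDelta lines[k] := by
  rw [bPre_getD lines (k + 1) (by omega), bPre_getD lines k (by omega)]
  have h := S_succ lines k hk
  simpa [S] using h

-- pass 2 equals B's find? over the prefix-sum array
lemma end_eq (lines : List String) (s : Nat) :
    ∀ (rest : List String) (off : Nat), 1 ≤ off → rest = lines.drop (s + off) →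
      midEnd s off rest ((bPre lines).getD (s + off) 0 - (bPre lines).getD s 0)
        = ((List.range' (s + off) (lines.length - (s + off))).find?
            (fun i => (bPre lines).getD (i + 1) 0 - (bPre lines).getD s 0 == 0)).map (fun i => (i : Int)) := by
  intro rest
  induction rest with
  | nil =>
    intro off _ hdrop
    have hlen := congrArg List.length hdrop
    simp only [List.length_nil, List.length_drop] at hlen
    rw [(by omega : lines.length - (s + off) = 0)]
    simp [midEnd]
  | cons l rest' ih =>
    intro off hoff hdrop
    have hi : s + off < lines.length := by
      by_contra hle
      simp [List.drop_eq_nil_of_le (by omega : lines.length ≤ s + off)] at hdrop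
    have hl : l = lines[s + off] := by
      have := List.drop_eq_getElem_cons hi (l := lines)
      rw [← hdrop] at this
      exact (List.cons.injEq _ _ _ _).mp this |>.1
    have hrest' : rest' = lines.drop (s + (off + 1)) := by
      have := List.drop_eq_getElem_cons hi (l := lines)
      rw [← hdrop] at this
      rw [(by omega : s + (off + 1) = s + off + 1)]
      exact (List.cons.injEq _ _ _ _).mp this |>.2
    have hbal1 : (bPre lines).getD (s + off) 0 - (bPre lines).getD s 0
          + (PySem.Str.count l "{" : Int) - (PySem.Str.count l "}" : Int)
        = (bPre lines).getD (s + off + 1) 0 - (bPre lines).getD s 0 := by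
      rw [pre_succ lines (s + off) hi, hl, sDelta]; ring
    rw [(by omega : lines.length - (s + off) = (lines.length - (s + off + 1)) + 1), List.range'_succ,
      List.find?_cons, midEnd, hbal1]
    cases hz : ((bPre lines).getD (s + off + 1) 0 - (bPre lines).getD s 0 == 0) with
    | true =>
      have hz' : (bPre lines).getD (s + off + 1) 0 - (bPre lines).getD s 0 = 0 := by
        simpa using hz
      rw [if_pos ⟨by omega, hz'⟩]
      simp
    | false =>
      have hz' : ¬ ((bPre lines).getD (s + off + 1) 0 - (bPre lines).getD s 0 = 0) := by
        simpa using hz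
      rw [if_neg (by intro hc; exact hz' hc.2)]
      have := ih (off + 1) (by omega) hrest'
      rw [(by omega : s + (off + 1) = s + off + 1)] at this
      exact this

-- midFindStart only returns in-range indices
lemma midFindStart_lt (lines : List String) :
    ∀ (rest : List String) (i s : Nat), rest = lines.drop i →
      midFindStart lines i rest = some s → s < lines.length := by
  intro rest
  induction rest with
  | nil => intro i s _ h; simp [midFindStart] at h
  | cons line rest' ih =>
    intro i s hdrop h
    have hi : i < lines.length := by
      by_contra hle
      simp [List.drop_eq_nil_of_le (by omega : lines.length ≤ i)] at hdrop
    have hrest' : rest' = lines.drop (i + 1) := by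
      have := List.drop_eq_getElem_cons hi (l := lines)
      rw [← hdrop] at this
      exact (List.cons.injEq _ _ _ _).mp this |>.2
    rw [midFindStart] at h
    by_cases hc : (PySem.Str.isIn "@override" line && ((lines.drop i).take 3).any bHit) = true
    · rw [if_pos hc] at h
      injection h with h'
      omega
    · rw [if_neg hc] at h; exact ih (i + 1) s hrest' h

-- ===== VERDICT (by name: the statement is the Claim_ definition above) =====
theorem find_build_method_range_spec : Claim_equal_find_build_method_range := by
  intro lines _
  unfold Spec_find_build_method_range find_build_method_range find_build_method_range_alt
  rw [phase1 lines lines 0 rfl]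
  have hfs := start_eq lines lines 0 rfl
  rw [(by omega : lines.length - 0 = lines.length), ← List.range_eq_range'] at hfs
  dsimp only
  cases hms : midFindStart lines 0 lines with
  | none =>
    simp only [hms] at hfs
    rw [show bHit = fun l => PySem.Str.isIn "Widget build(BuildContext context)" l from rfl] at hfs
    rw [← hfs]
  | some s =>
    simp only [hms] at hfs
    rw [show bHit = fun l => PySem.Str.isIn "Widget build(BuildContext context)" l from rfl] at hfs
    rw [← hfs]
    have hslt : s < lines.length := midFindStart_lt lines lines 0 s rfl hms
    dsimp only
    congr 1
    -- unfold midEnd one step at off = 0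
    have hdrop : lines.drop s = lines[s] :: lines.drop (s + 1) := List.drop_eq_getElem_cons hslt
    rw [hdrop]
    simp only [midEnd]
    have hnot : ¬ (0 < 0 ∧ (0 : Int) + (PySem.Str.count lines[s] "{" : Int) - (PySem.Str.count lines[s] "}" : Int) = 0) := by
      intro hc; exact absurd hc.1 (lt_irrefl 0)
    rw [if_neg hnot]
    have hbal : (0 : Int) + (PySem.Str.count lines[s] "{" : Int) - (PySem.Str.count lines[s] "}" : Int)
        = (bPre lines).getD (s + 1) 0 - (bPre lines).getD s 0 := by
      rw [pre_succ lines s hslt, sDelta]; ring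
    rw [hbal, end_eq lines s (lines.drop (s + 1)) 1 (le_refl 1) rfl]
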